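-- pv_equiv track=rewrite | github.com/domingoUnican/DA2324 | Ejercicios/capitulo_3/Particiones.py | p_act
-- ===== SOURCE A (Python) =====
-- def p_act(n, k):
--     """Calcula el número de particiones
--     de n con longitud acotada por k.
--     """
--     if n == k == 0:
--         return 1
--     elif n >= 0 and k >= 1:
--         return p_act(n, k - 1)\
--             + p_act(n - k, k)
--     else:
--         return 0
-- ===== SOURCE B (Python) =====
-- def p_act(n, k):
--     """Calcula el número de particiones
--     de n con longitud acotada por k.
--     """
--     if n < 0 or k < 0:
--         return 0
--     row = [1 if j == 0 else 0 for j in range(n + 1)]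
--     for part in range(1, k + 1):
--         for j in range(part, n + 1):
--             row[j] += row[j - part]
--     return row[n]
-- ===== Notes on version B (the rewrite author's own statement) =====
-- stated objective: faster
-- what changed: Replaces the exponential double recursion p(n,k)=p(n,k-1)+p(n-k,k) by a bottom-up 1D dynamic-programming table over parts 1..k, updated in place.
-- outside the precondition, e.g. on p_act(20000, 1): A raises RecursionError, B returns 1
import Mathlib
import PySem

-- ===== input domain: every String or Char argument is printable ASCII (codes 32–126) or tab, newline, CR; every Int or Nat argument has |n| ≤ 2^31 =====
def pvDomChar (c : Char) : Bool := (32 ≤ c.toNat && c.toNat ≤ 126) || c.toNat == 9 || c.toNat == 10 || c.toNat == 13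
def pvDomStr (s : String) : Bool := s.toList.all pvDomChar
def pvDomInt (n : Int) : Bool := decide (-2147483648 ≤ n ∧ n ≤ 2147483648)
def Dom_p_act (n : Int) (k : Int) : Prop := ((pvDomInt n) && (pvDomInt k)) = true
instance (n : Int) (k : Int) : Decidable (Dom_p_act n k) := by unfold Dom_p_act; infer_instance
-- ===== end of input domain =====

-- B replaces A's exponential double recursion by a bottom-up O(n*k) DP over a single row (same return value everywhere).

-- ===== PORT A =====
def p_act (n : Int) (k : Int) : Int :=
  if n = 0 ∧ k = 0 then 1
  else if 0 ≤ n ∧ 1 ≤ k then p_act n (k - 1) + p_act (n - k) k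
  else 0
termination_by (if n < 0 ∨ k < 0 then 0 else 2 * n.toNat + k.toNat + 1)
decreasing_by
  · split_ifs <;> omega
  · split_ifs <;> omega

-- ===== PORT B =====
def p_act_alt (n : Int) (k : Int) : Int :=
  if n < 0 ∨ k < 0 then 0
  else
    let row0 : List Int :=
      (PySem.List.pyRange 0 (n + 1) 1).map (fun j => if j = 0 then (1 : Int) else 0)
    let row :=
      (PySem.List.pyRange 1 (k + 1) 1).foldl
        (fun r part =>
          (PySem.List.pyRange part (n + 1) 1).foldl
            (fun r j =>
              PySem.List.pySetD r j (PySem.List.pyGetD r j 0 + PySem.List.pyGetD r (j - part) 0))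
            r)
        row0
    PySem.List.pyGetD row n 0

-- ===== PRECONDITION & SPEC =====
-- Pre_ excludes only the deep-recursion inputs (n ≥ 0, k ≥ 1, n + k large) on which CPython raises
-- RecursionError: A's recursion depth grows as n + k, so beyond the interpreter's stack limit A does
-- not return; the numeric cut keeps a margin below that limit. Everything else A accepts is admitted.
def Pre_p_act (n : Int) (k : Int) : Prop := n < 0 ∨ k < 1 ∨ n + k ≤ 9000
instance (n : Int) (k : Int) : Decidable (Pre_p_act n k) := by unfold Pre_p_act; infer_instance
def pvWitness_p_act : Int × Int := (7, 4)

def Spec_p_act (n : Int) (k : Int) (out : Int) : Prop := out = p_act_alt n k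
instance (n : Int) (k : Int) (out : Int) : Decidable (Spec_p_act n k out) := by unfold Spec_p_act; infer_instance

-- ===== CLAIM (what is proved, stated in full; the proofs are below) =====
def Claim_equal_p_act : Prop := ∀ (n : Int) (k : Int), Dom_p_act n k → Pre_p_act n k → Spec_p_act n k (p_act n k)

-- ===== LEMMAS AND PROOFS =====

def pvP : Nat → Nat → Int
  | j, 0 => if j = 0 then 1 else 0
  | j, (m + 1) => pvP j m + (if h : m + 1 ≤ j then pvP (j - (m + 1)) (m + 1) else 0)
termination_by j m => 2 * j + m
decreasing_by
  · omega
  · omega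
theorem pvP_zero (j : Nat) : pvP j 0 = if j = 0 then 1 else 0 := by
  rw [pvP]

theorem pvP_succ (j m : Nat) :
    pvP j (m + 1) = pvP j m + (if m + 1 ≤ j then pvP (j - (m + 1)) (m + 1) else 0) := by
  rw [pvP]; split <;> simp_all
theorem pvP_lt {j p : Nat} (hp : 1 ≤ p) (hj : j < p) : pvP j p = pvP j (p - 1) := by
  obtain ⟨m, rfl⟩ : ∃ m, p = m + 1 := ⟨p - 1, by omega⟩
  rw [pvP_succ]
  simp [Nat.not_le.mpr hj]
theorem pvP_split {t p : Nat} (hp : 1 ≤ p) (ht : p ≤ t) :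
    pvP t p = pvP t (p - 1) + pvP (t - p) p := by
  obtain ⟨m, rfl⟩ : ∃ m, p = m + 1 := ⟨p - 1, by omega⟩
  rw [pvP_succ, if_pos ht]
  simp

theorem pv_inner (n part : Int) (hn : 0 ≤ n) (hp : 1 ≤ part) :
    ∀ j0 : Int, part ≤ j0 →
    (PySem.List.pyRange j0 (n + 1) 1).foldl
      (fun r j => PySem.List.pySetD r j (PySem.List.pyGetD r j 0 + PySem.List.pyGetD r (j - part) 0))
      ((List.range (n.toNat + 1)).map (fun (i : Nat) => if (i : Int) < j0 then pvP i part.toNat else pvP i (part.toNat - 1)))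
    = (List.range (n.toNat + 1)).map (fun i => pvP i part.toNat) := by
  have main : ∀ (c : Nat) (j0 : Int), (n + 1 - j0).toNat ≤ c → part ≤ j0 →
      (PySem.List.pyRange j0 (n + 1) 1).foldl
        (fun r j => PySem.List.pySetD r j (PySem.List.pyGetD r j 0 + PySem.List.pyGetD r (j - part) 0))
        ((List.range (n.toNat + 1)).map (fun (i : Nat) => if (i : Int) < j0 then pvP i part.toNat else pvP i (part.toNat - 1)))
      = (List.range (n.toNat + 1)).map (fun i => pvP i part.toNat) := by
    intro c
    induction c with
    | zero =>
      intro j0 hc hj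
      have hend : n + 1 ≤ j0 := by omega
      rw [PySem.List.pyRange_one_eq_nil hend]
      simp only [List.foldl_nil]
      apply List.map_congr_left
      intro i hi
      rw [List.mem_range] at hi
      rw [if_pos (by omega)]
    | succ c ih =>
      intro j0 hc hj
      by_cases hend : n + 1 ≤ j0
      · rw [PySem.List.pyRange_one_eq_nil hend]
        simp only [List.foldl_nil]
        apply List.map_congr_left
        intro i hi
        rw [List.mem_range] at hi
        rw [if_pos (by omega)]
      · have hlt : j0 < n + 1 := by omega
        rw [PySem.List.pyRange_one_cons hlt]
        simp only [List.foldl_cons]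
        have hstep :
            PySem.List.pySetD
              ((List.range (n.toNat + 1)).map (fun (i : Nat) => if (i : Int) < j0 then pvP i part.toNat else pvP i (part.toNat - 1)))
              j0
              (PySem.List.pyGetD ((List.range (n.toNat + 1)).map (fun (i : Nat) => if (i : Int) < j0 then pvP i part.toNat else pvP i (part.toNat - 1))) j0 0 +
               PySem.List.pyGetD ((List.range (n.toNat + 1)).map (fun (i : Nat) => if (i : Int) < j0 then pvP i part.toNat else pvP i (part.toNat - 1))) (j0 - part) 0)
            = (List.range (n.toNat + 1)).map (fun (i : Nat) => if (i : Int) < j0 + 1 then pvP i part.toNat else pvP i (part.toNat - 1)) := by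
          set g := fun (i : Nat) => if (i : Int) < j0 then pvP i part.toNat else pvP i (part.toNat - 1) with hg
          have hlen : ((List.range (n.toNat + 1)).map g).length = n.toNat + 1 := by simp
          have hget1 : PySem.List.pyGetD ((List.range (n.toNat + 1)).map g) j0 0 = pvP j0.toNat (part.toNat - 1) := by
            rw [PySem.List.pyGetD_eq_getElem _ _ (by omega) (by simp; omega)]
            simp only [List.getElem_map, List.getElem_range, hg]
            rw [if_neg (by omega)]
          have hget2 : PySem.List.pyGetD ((List.range (n.toNat + 1)).map g) (j0 - part) 0 = pvP (j0 - part).toNat part.toNat := by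
            rw [PySem.List.pyGetD_eq_getElem _ _ (by omega) (by simp; omega)]
            simp only [List.getElem_map, List.getElem_range, hg]
            rw [if_pos (by omega)]
          rw [hget1, hget2, PySem.List.pySetD_of_nonneg _ _ (by omega)]
          apply List.ext_getElem
          · simp
          · intro i h1 h2
            simp only [List.length_set, List.length_map, List.length_range] at h1
            rw [List.getElem_set]
            simp only [List.getElem_map, List.getElem_range, hg]
            by_cases hi : j0.toNat = i
            · rw [if_pos hi, if_pos (by omega)]
              subst hi
              have e1 : (j0 - part).toNat = j0.toNat - part.toNat := by omega
              rw [e1, ← pvP_split (by omega) (by omega)]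
            · rw [if_neg hi]
              by_cases hlt2 : (i : Int) < j0
              · rw [if_pos hlt2, if_pos (by omega)]
              · rw [if_neg hlt2, if_neg (by omega)]
        rw [hstep]
        exact ih (j0 + 1) (by omega) (by omega)
  intro j0 hj
  exact main (n + 1 - j0).toNat j0 le_rfl hj

theorem pv_outer (n k : Int) (hn : 0 ≤ n) :
    ∀ a : Int, 1 ≤ a →
    (PySem.List.pyRange a (k + 1) 1).foldl
      (fun r part =>
        (PySem.List.pyRange part (n + 1) 1).foldl
          (fun r j => PySem.List.pySetD r j (PySem.List.pyGetD r j 0 + PySem.List.pyGetD r (j - part) 0))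
          r)
      ((List.range (n.toNat + 1)).map (fun (i : Nat) => pvP i (a - 1).toNat))
    = (List.range (n.toNat + 1)).map (fun (i : Nat) => pvP i (max (a - 1).toNat k.toNat)) := by
  have main : ∀ (c : Nat) (a : Int), (k + 1 - a).toNat ≤ c → 1 ≤ a →
      (PySem.List.pyRange a (k + 1) 1).foldl
        (fun r part =>
          (PySem.List.pyRange part (n + 1) 1).foldl
            (fun r j => PySem.List.pySetD r j (PySem.List.pyGetD r j 0 + PySem.List.pyGetD r (j - part) 0))
            r)
        ((List.range (n.toNat + 1)).map (fun (i : Nat) => pvP i (a - 1).toNat))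
      = (List.range (n.toNat + 1)).map (fun (i : Nat) => pvP i (max (a - 1).toNat k.toNat)) := by
    intro c
    induction c with
    | zero =>
      intro a hc ha
      have hend : k + 1 ≤ a := by omega
      rw [PySem.List.pyRange_one_eq_nil hend]
      simp only [List.foldl_nil]
      have : max (a - 1).toNat k.toNat = (a - 1).toNat := by omega
      rw [this]
    | succ c ih =>
      intro a hc ha
      by_cases hend : k + 1 ≤ a
      · rw [PySem.List.pyRange_one_eq_nil hend]
        simp only [List.foldl_nil]
        have : max (a - 1).toNat k.toNat = (a - 1).toNat := by omega
        rw [this]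
      · have hlt : a < k + 1 := by omega
        rw [PySem.List.pyRange_one_cons hlt]
        simp only [List.foldl_cons]
        have hmix : ((List.range (n.toNat + 1)).map (fun (i : Nat) => pvP i (a - 1).toNat))
            = (List.range (n.toNat + 1)).map
                (fun (i : Nat) => if (i : Int) < a then pvP i a.toNat else pvP i (a.toNat - 1)) := by
          apply List.map_congr_left
          intro i hi
          have e : (a - 1).toNat = a.toNat - 1 := by omega
          by_cases h : (i : Int) < a
          · rw [if_pos h, e, ← pvP_lt (j := i) (p := a.toNat) (by omega) (by omega)]
          · rw [if_neg h, e]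
        rw [hmix, pv_inner n a hn ha a le_rfl]
        have hIH := ih (a + 1) (by omega) (by omega)
        have e1 : (a + 1 - 1).toNat = a.toNat := by omega
        rw [e1] at hIH
        rw [hIH]
        have : max a.toNat k.toNat = max (a - 1).toNat k.toNat := by omega
        rw [this]
  intro a ha
  exact main (k + 1 - a).toNat a le_rfl ha

theorem pA_char (n k : Int) :
    p_act n k = if 0 ≤ n ∧ 0 ≤ k then pvP n.toNat k.toNat else 0 := by
  induction n, k using p_act.induct with
  | case1 n k h =>
    obtain ⟨rfl, rfl⟩ := h
    rw [p_act]; simp [pvP]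
  | case2 n k h1 h2 ih1 ih2 =>
    obtain ⟨hn, hk⟩ := h2
    rw [p_act, if_neg h1, if_pos ⟨hn, hk⟩, ih1, ih2,
        if_pos (⟨hn, by omega⟩ : 0 ≤ n ∧ 0 ≤ k - 1),
        if_pos (⟨hn, by omega⟩ : 0 ≤ n ∧ 0 ≤ k)]
    have hkt : k.toNat = (k - 1).toNat + 1 := by omega
    conv_rhs => rw [hkt, pvP_succ]
    congr 1
    rw [← hkt]
    by_cases hc : 0 ≤ n - k
    · rw [if_pos (⟨hc, by omega⟩ : 0 ≤ n - k ∧ 0 ≤ k),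
          if_pos (show k.toNat ≤ n.toNat by omega)]
      congr 1
      omega
    · rw [if_neg (fun h => hc h.1), if_neg (show ¬(k.toNat ≤ n.toNat) by omega)]
  | case3 n k h1 h2 =>
    rw [p_act, if_neg h1, if_neg h2]
    split
    · next h =>
      have hk0 : k = 0 := by omega
      have hn0 : n.toNat ≠ 0 := by omega
      subst hk0; simp [pvP, hn0]
    · rfl

theorem pB_char (n k : Int) :
    p_act_alt n k = if 0 ≤ n ∧ 0 ≤ k then pvP n.toNat k.toNat else 0 := by
  unfold p_act_alt
  by_cases hneg : n < 0 ∨ k < 0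
  · rw [if_pos hneg, if_neg (by omega)]
  · have hn : 0 ≤ n := by omega
    have hk : 0 ≤ k := by omega
    rw [if_neg hneg, if_pos ⟨hn, hk⟩]
    simp only []
    have hrow0 : (PySem.List.pyRange 0 (n + 1) 1).map (fun j => if j = 0 then (1 : Int) else 0)
        = (List.range (n.toNat + 1)).map (fun (i : Nat) => pvP i ((1 : Int) - 1).toNat) := by
      rw [PySem.List.pyRange_one, List.map_map]
      have e : (n + 1 - 0).toNat = n.toNat + 1 := by omega
      rw [e]
      apply List.map_congr_left
      intro i _
      simp only [Function.comp]
      have e2 : ((1 : Int) - 1).toNat = 0 := by omega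
      rw [e2, pvP_zero]
      by_cases h : i = 0
      · subst h; simp
      · rw [if_neg h, if_neg (by omega)]
    rw [hrow0, pv_outer n k hn 1 le_rfl]
    have e3 : max ((1 : Int) - 1).toNat k.toNat = k.toNat := by omega
    rw [e3, PySem.List.pyGetD_eq_getElem _ _ hn (by simp only [List.length_map, List.length_range]; omega)]
    simp only [List.getElem_map, List.getElem_range]

-- ===== VERDICT (by name: the statement is the Claim_ definition above) =====
theorem p_act_spec : Claim_equal_p_act := by
  intro n k _ _
  unfold Spec_p_act
  rw [pA_char, pB_char]
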